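-- pv_equiv track=rewrite | github.com/immunoliugy/spatial_thymus_aging | slide_tcr_functions.py | merge_hamming_clonotype
-- ===== SOURCE A (Python) =====
-- def hamming_distance(s1, s2):
--     """Reports if hamming distance between two strings is 1"""
--     if len(s1) != len(s2):
--         return 'Fail'
--     return sum(ch1 != ch2 for ch1, ch2 in zip(s1, s2))
--
-- def merge_hamming_clonotype(clonotype_dict):
--     """Merges clonotypes with a hamming distance of 1 into
--     the clonotype with more UMIs"""
--     hamming_sets = []
--     found = False
--     clonotype_dict_hamming = {}
--     for i in clonotype_dict:
--         found = False
--         for hset in hamming_sets: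
--             for cl in hset:
--                 if hamming_distance(i, cl) == 1:
--                     hset.append(i)
--                     found = True
--                     break
--             if found:
--                 break
--         if found:
--             continue
--         hamming_sets.append([i])
--
--     for hset in hamming_sets:
--         hset_lengths = [len(clonotype_dict[i]) for i in hset]
--         pref_clonotype = hset[hset_lengths.index(max(hset_lengths))]
--
--         clonotype_dict_hamming[pref_clonotype] = []
--         for cl in hset:
--             clonotype_dict_hamming[pref_clonotype] = (
--                 clonotype_dict_hamming[pref_clonotype] + clonotype_dict[cl])
--     return clonotype_dict_hamming
-- ===== SOURCE B (Python) =====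
-- def merge_hamming_clonotype(clonotype_dict):
--     """Merges clonotypes with a hamming distance of 1 into
--     the clonotype with more UMIs (pattern-index re-implementation)."""
--     pattern_min = {}   # one-wildcard pattern -> smallest set index seen so far
--     hamming_sets = []
--     for key in clonotype_dict:
--         pats = [(pos, key[:pos] + key[pos + 1:]) for pos in range(len(key))]
--         idxs = [pattern_min[p] for p in pats if p in pattern_min]
--         if idxs:
--             j = min(idxs)
--             hamming_sets[j].append(key)
--         else:
--             j = len(hamming_sets)
--             hamming_sets.append([key])
--         for p in pats:
--             if p not in pattern_min or j < pattern_min[p]: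
--                 pattern_min[p] = j
--     merged = {}
--     for hset in hamming_sets:
--         pref = max(hset, key=lambda cl: len(clonotype_dict[cl]))
--         merged[pref] = [umi for cl in hset for umi in clonotype_dict[cl]]
--     return merged
-- ===== Notes on version B (the rewrite author's own statement) =====
-- stated objective: faster
-- what changed: Replaces the quadratic scan of all existing clusters for a Hamming-1 neighbour with a one-wildcard-pattern index mapping each pattern to the smallest cluster index that contains it, so each clonotype is assigned to the minimum-index neighbouring cluster directly; Pre_ only excludes association lists with duplicate keys, which do not represent A's Python dict argument.
import Mathlib
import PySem

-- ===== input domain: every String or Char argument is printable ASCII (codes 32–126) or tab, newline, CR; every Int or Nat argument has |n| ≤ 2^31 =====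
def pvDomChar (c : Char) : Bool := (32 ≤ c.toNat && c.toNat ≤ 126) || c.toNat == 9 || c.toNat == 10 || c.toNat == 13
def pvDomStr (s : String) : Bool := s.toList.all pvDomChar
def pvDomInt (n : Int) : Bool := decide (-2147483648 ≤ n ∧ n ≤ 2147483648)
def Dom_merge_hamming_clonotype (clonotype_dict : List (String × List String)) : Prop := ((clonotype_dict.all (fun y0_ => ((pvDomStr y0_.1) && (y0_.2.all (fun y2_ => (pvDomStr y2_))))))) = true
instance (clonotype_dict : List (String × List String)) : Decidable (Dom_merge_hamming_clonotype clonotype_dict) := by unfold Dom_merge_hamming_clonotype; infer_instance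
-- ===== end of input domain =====

-- B replaces A's quadratic scan of existing clusters with a one-wildcard-pattern index
-- (pattern -> smallest cluster index), assigning each clonotype to the minimum-index
-- neighbouring cluster; measured faster on large inputs.


-- ===== PORT A =====
-- hamming_distance: 'Fail' (returned when the lengths differ) becomes none; the 0/1-bool
-- sum over zip(s1, s2) is countP over List.zip — exact.
def hamming_distance (s1 s2 : String) : Option Int :=
  if s1.toList.length ≠ s2.toList.length then none
  else some (((s1.toList.zip s2.toList).countP (fun p => p.1 != p.2) : Nat) : Int)

-- the inner double loop of A: find the first hamming set holding a member at distance 1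
-- and append i to it (none = no such set; A then starts a new set).
def pvPlaceA (i : String) : List (List String) → Option (List (List String))
  | [] => none
  | h :: t =>
    if h.any (fun cl => hamming_distance i cl == some 1) then some ((h ++ [i]) :: t)
    else match pvPlaceA i t with
         | some t' => some (h :: t')
         | none => none

def pvStepAFn (hs : List (List String)) (i : String) : List (List String) :=
  match pvPlaceA i hs with
  | some hs' => hs'
  | none => hs ++ [[i]]

def pvSetsA (keys : List String) : List (List String) :=
  keys.foldl pvStepAFn []

-- Python 'max(...)' / '.index(...)' / 'hset[idx]' raise on inputs that never occur here
-- (a hamming set is never empty); the 'none' fallthroughs only make the port total.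
def merge_hamming_clonotype (clonotype_dict : List (String × List String)) : List (String × List String) :=
  let d := PySem.Dict.mk clonotype_dict
  let hs := pvSetsA (clonotype_dict.map (·.1))
  (hs.foldl (fun out hset =>
      let lens : List Int := hset.map (fun i => ((d.getD i []).length : Int))
      match PySem.List.max? lens (fun x => x) with
      | none => out
      | some m =>
        match PySem.List.index? lens m with
        | none => out
        | some idx =>
          match hset[idx]? with
          | none => out
          | some pref =>
            hset.foldl (fun o cl => o.insert pref (o.getD pref [] ++ d.getD cl []))
              (out.insert pref [])) PySem.Dict.empty).items

-- ===== PORT B =====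
-- the one-wildcard patterns of key: (pos, key[:pos] + key[pos+1:]); the slices are exact
-- here since 0 ≤ pos < len(key).
def pvPats (key : String) : List (Nat × List Char) :=
  (List.range key.toList.length).map
    (fun pos => (pos, key.toList.take pos ++ key.toList.drop (pos + 1)))

-- one iteration of B's first loop; 'hamming_sets[j].append(key)' is List.set at j
-- (j < length always holds: j is a stored set index).
def pvStepB (st : PySem.Dict (Nat × List Char) Nat × List (List String)) (key : String) :
    PySem.Dict (Nat × List Char) Nat × List (List String) :=
  let pats := pvPats key
  let idxs := pats.filterMap st.1.get?
  let (j, sets) :=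
    match PySem.List.min? idxs (fun x => x) with
    | some j => (j, st.2.set j (st.2.getD j [] ++ [key]))
    | none => (st.2.length, st.2 ++ [[key]])
  (pats.foldl (fun dm p =>
      match dm.get? p with
      | none => dm.insert p j
      | some v => if j < v then dm.insert p j else dm) st.1,
   sets)

def merge_hamming_clonotype_alt (clonotype_dict : List (String × List String)) : List (String × List String) :=
  let d := PySem.Dict.mk clonotype_dict
  let sets := ((clonotype_dict.map (·.1)).foldl pvStepB (PySem.Dict.empty, [])).2
  (sets.foldl (fun out hset =>
      match PySem.List.max? hset (fun cl => ((d.getD cl []).length : Int)) with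
      | none => out
      | some pref => out.insert pref (hset.flatMap (fun cl => d.getD cl []))) PySem.Dict.empty).items

-- ===== PRECONDITION & SPEC =====
-- Pre_ excludes association lists with duplicate keys: A's parameter is a Python dict,
-- which cannot contain duplicate keys, so such lists do not represent any input of A.
def Pre_merge_hamming_clonotype (clonotype_dict : List (String × List String)) : Prop :=
  (clonotype_dict.map Prod.fst).Nodup

instance (clonotype_dict : List (String × List String)) : Decidable (Pre_merge_hamming_clonotype clonotype_dict) := by
  unfold Pre_merge_hamming_clonotype; infer_instance

def pvWitness_merge_hamming_clonotype : (List (String × List String)) :=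
  [("ACG", ["u1"]), ("ACT", ["u2", "u3"]), ("TTT", ["u4"])]

def Spec_merge_hamming_clonotype (clonotype_dict : List (String × List String)) (out : List (String × List String)) : Prop := out = merge_hamming_clonotype_alt clonotype_dict
instance (clonotype_dict : List (String × List String)) (out : List (String × List String)) : Decidable (Spec_merge_hamming_clonotype clonotype_dict out) := by unfold Spec_merge_hamming_clonotype; infer_instance

-- ===== CLAIM (what is proved, stated in full; the proofs are below) =====
def Claim_equal_merge_hamming_clonotype : Prop := ∀ (clonotype_dict : List (String × List String)), Dom_merge_hamming_clonotype clonotype_dict → Pre_merge_hamming_clonotype clonotype_dict → Spec_merge_hamming_clonotype clonotype_dict (merge_hamming_clonotype clonotype_dict)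

-- ===== LEMMAS AND PROOFS =====

-- the Hamming 'character difference count' of A, on char lists
def pvCd (x y : List Char) : Nat := (x.zip y).countP (fun p => p.1 != p.2)

lemma pvCd_cons (c d : Char) (x y : List Char) :
    pvCd (c :: x) (d :: y) = (if c = d then 0 else 1) + pvCd x y := by
  simp only [pvCd, List.zip_cons_cons, List.countP_cons]
  by_cases hc : c = d <;> simp [hc] <;> omega

lemma pvCd_self (x : List Char) : pvCd x x = 0 := by
  induction x with
  | nil => rfl
  | cons c t ih => simp [pvCd_cons, ih]

lemma pvCd_eq_zero_iff (x : List Char) : ∀ y, x.length = y.length → (pvCd x y = 0 ↔ x = y) := by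
  induction x with
  | nil => intro y h; cases y with
    | nil => simp [pvCd]
    | cons d t => simp at h
  | cons c t ih =>
    intro y h
    cases y with
    | nil => simp at h
    | cons d u =>
      simp only [List.length_cons, Nat.add_right_cancel_iff] at h
      rw [pvCd_cons]
      constructor
      · intro h0
        split_ifs at h0 with hc
        · simp at h0
          rw [(ih u h).1 h0, hc]
        · omega
      · intro he
        injection he with h1 h2
        subst h1; subst h2
        simp [pvCd_self]

lemma pvShared_list : ∀ (x y : List Char), x ≠ y →
    ((∃ pos, pos < x.length ∧ pos < y.length ∧
      x.take pos ++ x.drop (pos + 1) = y.take pos ++ y.drop (pos + 1))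
    ↔ (x.length = y.length ∧ pvCd x y = 1)) := by
  intro x
  induction x with
  | nil =>
    intro y hxy
    constructor
    · rintro ⟨pos, hp, _⟩; simp at hp
    · rintro ⟨hl, _⟩
      exact absurd ((List.length_eq_zero_iff).1 hl.symm).symm hxy
  | cons c t ih =>
    intro y hxy
    cases y with
    | nil =>
      constructor
      · rintro ⟨pos, _, hp, _⟩; simp at hp
      · rintro ⟨hl, _⟩; simp at hl
    | cons d u =>
      by_cases hc : c = d
      · subst hc
        have hne : t ≠ u := fun h => hxy (by rw [h])
        constructor
        · rintro ⟨pos, hp1, hp2, heq⟩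
          cases pos with
          | zero => simp at heq; exact absurd heq hne
          | succ k =>
            simp only [List.take_succ_cons, List.drop_succ_cons, List.cons_append,
              List.cons.injEq, true_and] at heq
            simp only [List.length_cons] at hp1 hp2
            have := (ih u hne).1 ⟨k, by omega, by omega, heq⟩
            refine ⟨by simp [this.1], ?_⟩
            rw [pvCd_cons, if_pos rfl]
            simpa using this.2
        · rintro ⟨hl, hcd⟩
          simp only [List.length_cons, Nat.add_right_cancel_iff] at hl
          rw [pvCd_cons, if_pos rfl, Nat.zero_add] at hcd
          obtain ⟨k, hk1, hk2, heq⟩ := (ih u hne).2 ⟨hl, hcd⟩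
          exact ⟨k + 1, by simp; omega, by simp; omega, by
            simp only [List.take_succ_cons, List.drop_succ_cons, List.cons_append, heq]⟩
      · constructor
        · rintro ⟨pos, hp1, hp2, heq⟩
          cases pos with
          | zero =>
            simp only [List.take_zero, List.nil_append, List.drop_succ_cons,
              List.drop_zero] at heq
            subst heq
            rw [pvCd_cons, if_neg hc]
            simp [pvCd_self]
          | succ k =>
            simp only [List.take_succ_cons, List.cons_append, List.cons.injEq] at heq
            exact absurd heq.1 hc
        · rintro ⟨hl, hcd⟩
          simp only [List.length_cons, Nat.add_right_cancel_iff] at hl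
          rw [pvCd_cons, if_neg hc] at hcd
          have h0 : pvCd t u = 0 := by omega
          have := (pvCd_eq_zero_iff t u hl).1 h0
          exact ⟨0, by simp, by simp, by simpa using this⟩

lemma pvShared_iff (i m : String) (hne : i ≠ m) :
    (∃ p, p ∈ pvPats i ∧ p ∈ pvPats m) ↔ (hamming_distance i m == some 1) = true := by
  have hxy : i.toList ≠ m.toList := fun h => hne (String.toList_inj.mp h)
  have hmain := pvShared_list i.toList m.toList hxy
  constructor
  · rintro ⟨p, hpi, hpm⟩
    simp only [pvPats, List.mem_map, List.mem_range] at hpi hpm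
    obtain ⟨pos, hpos, hp⟩ := hpi
    obtain ⟨pos', hpos', hp'⟩ := hpm
    rw [← hp] at hp'
    have hposeq : pos' = pos := congrArg Prod.fst hp'
    rw [hposeq] at hp' hpos'
    have heq : i.toList.take pos ++ i.toList.drop (pos + 1)
        = m.toList.take pos ++ m.toList.drop (pos + 1) := (congrArg Prod.snd hp').symm
    obtain ⟨hl, hcd⟩ := hmain.1 ⟨pos, hpos, hpos', heq⟩
    simp only [hamming_distance, if_neg (by omega : ¬ i.toList.length ≠ m.toList.length)]
    have : ((i.toList.zip m.toList).countP (fun p => p.1 != p.2)) = 1 := hcd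
    simp [this]
  · intro h
    simp only [hamming_distance] at h
    split_ifs at h with hl
    · simp at h
    · push_neg at hl
      simp only [beq_iff_eq, Option.some.injEq] at h
      have hcd : pvCd i.toList m.toList = 1 := by
        have := h
        exact_mod_cast this
      obtain ⟨pos, h1, h2, h3⟩ := hmain.2 ⟨hl, hcd⟩
      refine ⟨(pos, i.toList.take pos ++ i.toList.drop (pos + 1)), ?_, ?_⟩
      · simp only [pvPats, List.mem_map, List.mem_range]
        exact ⟨pos, h1, rfl⟩
      · simp only [pvPats, List.mem_map, List.mem_range]
        exact ⟨pos, h2, by rw [← h3]⟩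

lemma pvPlaceA_eq (i : String) (sets : List (List String)) :
    pvPlaceA i sets =
      match sets.findIdx? (fun hs => hs.any (fun cl => hamming_distance i cl == some 1)) with
      | none => none
      | some j => some (sets.set j (sets.getD j [] ++ [i])) := by
  induction sets with
  | nil => rfl
  | cons h t ih =>
    by_cases hp : h.any (fun cl => hamming_distance i cl == some 1)
    · simp [pvPlaceA, hp, List.findIdx?_cons]
    · simp only [pvPlaceA, hp, if_false, List.findIdx?_cons, Option.map]
      rw [ih]
      cases hf : t.findIdx? (fun hs => hs.any (fun cl => hamming_distance i cl == some 1)) with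
      | none => simp [hf]
      | some j => simp [hf, List.set, List.getD]

lemma pvPlaceA_flatten (i : String) : ∀ (sets sets' : List (List String)),
    pvPlaceA i sets = some sets' → sets'.flatten.Perm (i :: sets.flatten) := by
  intro sets
  induction sets with
  | nil => intro s' h; simp [pvPlaceA] at h
  | cons h t ih =>
    intro s' hs
    by_cases hp : h.any (fun cl => hamming_distance i cl == some 1)
    · simp only [pvPlaceA, hp, if_true, Option.some.injEq] at hs
      subst hs
      simp only [List.flatten_cons]
      exact (List.Perm.append_right t.flatten (List.perm_append_singleton i h)).trans
        (by rfl)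
    · simp only [pvPlaceA, hp, if_false] at hs
      cases ht : pvPlaceA i t with
      | none => rw [ht] at hs; simp at hs
      | some t' =>
        rw [ht] at hs; simp at hs
        subst hs
        simp only [List.flatten_cons]
        exact (List.Perm.append_left h (ih t' ht)).trans List.perm_middle

lemma pvStepAFn_flatten (i : String) (sets : List (List String)) :
    (pvStepAFn sets i).flatten.Perm (i :: sets.flatten) := by
  unfold pvStepAFn
  cases h : pvPlaceA i sets with
  | some s' => exact pvPlaceA_flatten i sets s' h
  | none =>
    simp only [List.flatten_append, List.flatten_cons, List.flatten_nil, List.append_nil]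
    exact List.perm_append_singleton i sets.flatten

-- B's pattern index maps a pattern to the first (= smallest) set index holding it
def pvQ (p : Nat × List Char) (hs : List String) : Bool := hs.any (fun m => decide (p ∈ pvPats m))

def pvInv (patMin : PySem.Dict (Nat × List Char) Nat) (sets : List (List String)) : Prop :=
  ∀ p, patMin.get? p = sets.findIdx? (pvQ p)

lemma pvFoldPat (pats : List (Nat × List Char)) (j : Nat) :
    ∀ (d : PySem.Dict (Nat × List Char) Nat) (q : Nat × List Char),
    (pats.foldl (fun dm p =>
      match dm.get? p with
      | none => dm.insert p j
      | some v => if j < v then dm.insert p j else dm) d).get? q =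
    if q ∈ pats then (match d.get? q with | none => some j | some v => some (min j v)) else d.get? q := by
  induction pats with
  | nil => intro d q; simp
  | cons p rest ih =>
    intro d q
    simp only [List.foldl_cons, ih, List.mem_cons]
    by_cases hq : q = p
    · subst hq
      have hstep : (match d.get? q with
          | none => d.insert q j
          | some v => if j < v then d.insert q j else d).get? q
            = (match d.get? q with | none => some j | some v => some (min j v)) := by
        cases hd : d.get? q with
        | none => simp [PySem.Dict.get?_insert_self]
        | some v =>
          by_cases hj : j < v
          · have : min j v = j := by omega
            simp [hj, PySem.Dict.get?_insert_self, this]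
          · have : min j v = v := by omega
            simp [hj, hd, this]
      simp only [true_or, if_pos, hstep]
      by_cases hr : q ∈ rest
      · simp only [if_pos hr]
        cases hd : d.get? q with
        | none =>
          have : min j j = j := by omega
          simp [this]
        | some v =>
          have : min j (min j v) = min j v := by omega
          simp [this]
      · simp only [if_neg hr]
    · have hstep : (match d.get? p with
          | none => d.insert p j
          | some v => if j < v then d.insert p j else d).get? q = d.get? q := by
        cases hd : d.get? p with
        | none => exact PySem.Dict.get?_insert_of_ne _ _ hq
        | some v =>
          by_cases hj : j < v
          · simpa [hj] using PySem.Dict.get?_insert_of_ne (d := d) (v := j) hq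
          · simp [hj]
      simp only [hstep]
      by_cases hr : q ∈ rest
      · simp [hr]
      · simp [hq, hr]

lemma pvFindIdxExt {α β : Type} (p : α → Bool) (q : β → Bool) :
    ∀ (l : List α) (l' : List β), l.length = l'.length →
    (∀ k (h : k < l.length) (h' : k < l'.length), p l[k] = q l'[k]) →
    l.findIdx? p = l'.findIdx? q := by
  intro l
  induction l with
  | nil => intro l' hl _; cases l' with
    | nil => rfl
    | cons b t => simp at hl
  | cons a t ih =>
    intro l' hl hk
    cases l' with
    | nil => simp at hl
    | cons b u =>
      have h0 : p a = q b := hk 0 (by simp) (by simp)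
      simp only [List.findIdx?_cons, h0]
      by_cases hb : q b = true
      · simp [hb]
      · simp only [hb, if_neg, Bool.false_eq_true, if_false]
        rw [ih u (by simpa using hl) (fun k h h' => hk (k+1) (by simpa using h) (by simpa using h'))]

lemma pvR_iff (i : String) (hs : List String) (hmem : ∀ m ∈ hs, m ≠ i) :
    (hs.any (fun cl => hamming_distance i cl == some 1)) = true ↔
      ∃ p ∈ pvPats i, pvQ p hs = true := by
  simp only [List.any_eq_true, pvQ, decide_eq_true_eq]
  constructor
  · rintro ⟨m, hm, hadj⟩
    obtain ⟨p, hpi, hpm⟩ := (pvShared_iff i m (fun h => (hmem m hm) h.symm)).2 hadj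
    exact ⟨p, hpi, ⟨m, hm, hpm⟩⟩
  · rintro ⟨p, hpi, m, hm, hpm⟩
    exact ⟨m, hm, (pvShared_iff i m (fun h => (hmem m hm) h.symm)).1 ⟨p, hpi, hpm⟩⟩

lemma pvMinFind (i : String) (patMin : PySem.Dict (Nat × List Char) Nat)
    (sets : List (List String)) (hInv : pvInv patMin sets)
    (hfresh : i ∉ sets.flatten) :
    PySem.List.min? ((pvPats i).filterMap patMin.get?) (fun x => x)
      = sets.findIdx? (fun hs => hs.any (fun cl => hamming_distance i cl == some 1)) := by
  have hmem : ∀ hs ∈ sets, ∀ m ∈ hs, m ≠ i := by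
    intro hs hhs m hm heq
    exact hfresh (List.mem_flatten.2 ⟨hs, hhs, heq ▸ hm⟩)
  have hidxs : (pvPats i).filterMap patMin.get? =
      (pvPats i).filterMap (fun p => sets.findIdx? (pvQ p)) :=
    List.filterMap_congr (fun p _ => hInv p)
  rw [hidxs]
  cases hres : sets.findIdx? (fun hs => hs.any (fun cl => hamming_distance i cl == some 1)) with
  | none =>
    have hnone := List.findIdx?_eq_none_iff.1 hres
    have : (pvPats i).filterMap (fun p => sets.findIdx? (pvQ p)) = [] := by
      rw [List.filterMap_eq_nil_iff]
      intro p hp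
      rw [List.findIdx?_eq_none_iff]
      intro hs hhs
      by_contra hQ
      simp only [Bool.not_eq_false] at hQ
      have := (pvR_iff i hs (hmem hs hhs)).2 ⟨p, hp, hQ⟩
      rw [hnone hs hhs] at this; simp at this
    rw [this]; rfl
  | some j =>
    obtain ⟨hj, hRj, hmin⟩ := List.findIdx?_eq_some_iff_getElem.1 hres
    obtain ⟨p0, hp0, hQ0⟩ := (pvR_iff i sets[j] (hmem _ (sets.getElem_mem hj))).1 hRj
    have hFp0 : sets.findIdx? (pvQ p0) = some j := by
      rw [List.findIdx?_eq_some_iff_getElem]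
      refine ⟨hj, hQ0, ?_⟩
      intro k hk
      by_contra hQk
      have hk' : k < sets.length := by omega
      have := (pvR_iff i sets[k] (hmem _ (sets.getElem_mem hk'))).2 ⟨p0, hp0, by simpa using hQk⟩
      exact (hmin k hk) (by simpa using this)
    have hjmem : j ∈ (pvPats i).filterMap (fun p => sets.findIdx? (pvQ p)) :=
      List.mem_filterMap.2 ⟨p0, hp0, hFp0⟩
    have hge : ∀ v ∈ (pvPats i).filterMap (fun p => sets.findIdx? (pvQ p)), j ≤ v := by
      intro v hv
      obtain ⟨p, hp, hFp⟩ := List.mem_filterMap.1 hv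
      obtain ⟨hv', hQv, _⟩ := List.findIdx?_eq_some_iff_getElem.1 hFp
      by_contra hlt
      have := (pvR_iff i sets[v] (hmem _ (sets.getElem_mem hv'))).2 ⟨p, hp, hQv⟩
      exact (hmin v (by omega)) (by simpa using this)
    cases hminr : PySem.List.min? ((pvPats i).filterMap (fun p => sets.findIdx? (pvQ p))) (fun x => x) with
    | none =>
      rw [PySem.List.min?_eq_none_iff] at hminr
      rw [hminr] at hjmem; simp at hjmem
    | some m =>
      have h1 : m ∈ _ := PySem.List.min?_mem hminr
      have h2 := PySem.List.min?_isMin hminr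
      have : m = j := le_antisymm (h2 j hjmem) (hge m h1)
      rw [this]

lemma pvStepB_eq (i : String) (patMin : PySem.Dict (Nat × List Char) Nat)
    (sets : List (List String)) (hInv : pvInv patMin sets) (hfresh : i ∉ sets.flatten) :
    (pvStepB (patMin, sets) i).2 = pvStepAFn sets i ∧
      pvInv (pvStepB (patMin, sets) i).1 (pvStepAFn sets i) := by
  have hmem : ∀ hs ∈ sets, ∀ m ∈ hs, m ≠ i := by
    intro hs hhs m hm heq
    exact hfresh (List.mem_flatten.2 ⟨hs, hhs, heq ▸ hm⟩)
  have hmf := pvMinFind i patMin sets hInv hfresh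
  unfold pvStepB pvStepAFn
  rw [pvPlaceA_eq]
  cases hres : sets.findIdx? (fun hs => hs.any (fun cl => hamming_distance i cl == some 1)) with
  | none =>
    simp only [hmf, hres]
    constructor
    · trivial
    · intro q
      rw [pvFoldPat]
      rw [List.findIdx?_append]
      by_cases hq : q ∈ pvPats i
      · have hQi : List.findIdx? (pvQ q) [[i]] = some 0 := by
          simp [List.findIdx?_cons, pvQ, hq]
        rw [if_pos hq, hQi, hInv q]
        cases hF : sets.findIdx? (pvQ q) with
        | none => simp
        | some v =>
          obtain ⟨hv, _, _⟩ := List.findIdx?_eq_some_iff_getElem.1 hF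
          have : min sets.length v = v := by omega
          simp [this]
      · have hQi : List.findIdx? (pvQ q) [[i]] = none := by
          simp [List.findIdx?_cons, pvQ, hq]
        rw [if_neg hq, hQi, hInv q]
        simp
  | some j =>
    obtain ⟨hj, hRj, hminj⟩ := List.findIdx?_eq_some_iff_getElem.1 hres
    simp only [hmf, hres]
    constructor
    · trivial
    · intro q
      rw [pvFoldPat]
      have hlen : (sets.set j (sets.getD j [] ++ [i])).length = sets.length := by simp
      by_cases hq : q ∈ pvPats i
      · -- new findIdx? is exactly j
        have hnew : (sets.set j (sets.getD j [] ++ [i])).findIdx? (pvQ q) = some j := by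
          rw [List.findIdx?_eq_some_iff_getElem]
          refine ⟨by omega, ?_, ?_⟩
          · rw [List.getElem_set_self (by omega)]
            simp only [pvQ, List.any_append]
            have : [i].any (fun m => decide (q ∈ pvPats m)) = true := by simp [hq]
            simp [this]
          · intro k hk
            rw [List.getElem_set_ne (by omega) (by omega)]
            intro hQk
            have hk' : k < sets.length := by omega
            have := (pvR_iff i sets[k] (hmem _ (sets.getElem_mem hk'))).2 ⟨q, hq, hQk⟩
            exact (hminj k hk) (by simpa using this)
        rw [if_pos hq, hnew, hInv q]
        cases hF : sets.findIdx? (pvQ q) with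
        | none => rfl
        | some v =>
          obtain ⟨hv, hQv, _⟩ := List.findIdx?_eq_some_iff_getElem.1 hF
          have hjv : j ≤ v := by
            by_contra hlt
            have := (pvR_iff i sets[v] (hmem _ (sets.getElem_mem hv))).2 ⟨q, hq, hQv⟩
            exact (hminj v (by omega)) (by simpa using this)
          have : min j v = j := by omega
          simp [this]
      · -- pattern q untouched: pointwise equal predicate values
        have hnew : (sets.set j (sets.getD j [] ++ [i])).findIdx? (pvQ q) = sets.findIdx? (pvQ q) := by
          apply pvFindIdxExt
          · exact hlen
          · intro k h1 h2
            by_cases hkj : k = j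
            · subst hkj
              rw [List.getElem_set_self (by omega)]
              simp only [pvQ, List.any_append]
              have h1i : [i].any (fun m => decide (q ∈ pvPats m)) = false := by simp [hq]
              rw [h1i, Bool.or_false]
              congr 1
              exact List.getD_eq_getElem sets [] (by omega)
            · rw [List.getElem_set_ne (fun h => hkj h.symm) (by omega)]
        rw [if_neg hq, hnew, hInv q]

lemma pvMaxAppend {α κ : Type} [LinearOrder κ] {f : α → κ} (l : List α) (x : α) :
    PySem.List.max? (l ++ [x]) f =
      match PySem.List.max? l f with
      | none => some x
      | some m0 => if f m0 < f x then some x else some m0 := by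
  cases hl : PySem.List.max? l f with
  | none =>
    have hnil : l = [] := (PySem.List.max?_eq_none_iff _ _).1 hl
    subst hnil
    rfl
  | some m0 =>
    simp only [PySem.List.max?] at hl ⊢
    rw [List.foldl_append, List.foldl_cons, List.foldl_nil, hl]

lemma pvMaxDecomp {f : String → Int} : ∀ (l : List String) (m : String),
    PySem.List.max? l f = some m →
    ∃ l₁ l₂, l = l₁ ++ m :: l₂ ∧ (∀ y ∈ l₁, f y < f m) ∧ (∀ y ∈ l₂, f y ≤ f m) := by
  intro l
  induction l using List.reverseRecOn with
  | nil => intro m h; simp [PySem.List.max?] at h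
  | append_singleton l x ih =>
    intro m h
    rw [pvMaxAppend] at h
    cases hl : PySem.List.max? l f with
    | none =>
      rw [hl] at h; dsimp only at h; simp only [Option.some.injEq] at h
      have hnil : l = [] := (PySem.List.max?_eq_none_iff _ _).1 hl
      subst hnil
      cases h
      exact ⟨[], [], rfl, by simp, by simp⟩
    | some m0 =>
      rw [hl] at h
      dsimp only at h
      have hmax := PySem.List.max?_isMax hl
      by_cases hfx : f m0 < f x
      · rw [if_pos hfx] at h
        simp only [Option.some.injEq] at h
        cases h
        exact ⟨l, [], rfl, fun y hy => lt_of_le_of_lt (hmax y hy) hfx, by simp⟩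
      · rw [if_neg hfx] at h
        simp only [Option.some.injEq] at h
        cases h
        obtain ⟨l₁, l₂, heq, h1, h2⟩ := ih m hl
        refine ⟨l₁, l₂ ++ [x], by rw [heq]; simp, h1, ?_⟩
        intro y hy
        rcases List.mem_append.1 hy with hy | hy
        · exact h2 y hy
        · simp at hy; subst hy; omega

lemma pvMaxMap (f : String → Int) : ∀ l : List String,
    PySem.List.max? (l.map f) (fun x => x) = Option.map f (PySem.List.max? l f) := by
  intro l
  induction l using List.reverseRecOn with
  | nil => rfl
  | append_singleton l x ih =>
    rw [List.map_append, List.map_cons, List.map_nil, pvMaxAppend, pvMaxAppend, ih]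
    cases hl : PySem.List.max? l f with
    | none => rfl
    | some m0 =>
      dsimp only [Option.map_some]
      by_cases hfx : f m0 < f x
      · rw [if_pos hfx, if_pos hfx]; rfl
      · rw [if_neg hfx, if_neg hfx]; rfl

lemma pvIdxOfAppend {f : String → Int} (m : String) : ∀ (l₁ : List String) (l₂ : List String),
    (∀ y ∈ l₁, f y ≠ f m) →
    PySem.List.index? ((l₁ ++ m :: l₂).map f) (f m) = some l₁.length := by
  intro l₁
  induction l₁ with
  | nil =>
    intro l₂ _
    simp [PySem.List.index?, List.idxOf?, List.findIdx?_cons]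
  | cons a t ih =>
    intro l₂ hne
    have ha : (f a == f m) = false := beq_eq_false_iff_ne.2 (hne a (by simp))
    have hrec := ih l₂ (fun y hy => hne y (by simp [hy]))
    simp only [PySem.List.index?, List.idxOf?] at hrec ⊢
    simp only [List.cons_append, List.map_cons, List.findIdx?_cons, ha]
    simp only [Bool.false_eq_true, if_false, hrec, Option.map_some]
    rfl

lemma pvArgmax (hset : List String) (f : String → Int) (pref : String)
    (h : PySem.List.max? hset f = some pref) :
    ∃ m idx, PySem.List.max? (hset.map f) (fun x => x) = some m ∧
      PySem.List.index? (hset.map f) m = some idx ∧ hset[idx]? = some pref := by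
  obtain ⟨l₁, l₂, heq, h1, h2⟩ := pvMaxDecomp hset pref h
  subst heq
  refine ⟨f pref, l₁.length, ?_, ?_, ?_⟩
  · rw [pvMaxMap, h]; rfl
  · exact pvIdxOfAppend pref l₁ l₂ (fun y hy => ne_of_lt (h1 y hy))
  · rw [List.getElem?_append_right (le_refl _)]
    simp

lemma pvFoldIns (g : String → List String) (pref : String) :
    ∀ (hset : List String) (out : PySem.Dict String (List String)) (acc : List String),
    hset.foldl (fun o cl => o.insert pref (o.getD pref [] ++ g cl)) (out.insert pref acc)
      = out.insert pref (acc ++ hset.flatMap g) := by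
  intro hset
  induction hset with
  | nil => intro out acc; simp
  | cons cl rest ih =>
    intro out acc
    simp only [List.foldl_cons]
    rw [PySem.Dict.getD_insert_self, PySem.Dict.insert_insert_self, ih]
    simp [List.flatMap_cons, List.append_assoc]

lemma pvSets_eq : ∀ (keys : List String) (patMin : PySem.Dict (Nat × List Char) Nat)
    (sets : List (List String)),
    pvInv patMin sets → (∀ k ∈ keys, k ∉ sets.flatten) → keys.Nodup →
    (keys.foldl pvStepB (patMin, sets)).2 = keys.foldl pvStepAFn sets := by
  intro keys
  induction keys with
  | nil => intros; rfl
  | cons i rest ih =>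
    intro patMin sets hInv hfresh hnd
    simp only [List.foldl_cons]
    have hstep := pvStepB_eq i patMin sets hInv (hfresh i (by simp))
    have hpair : pvStepB (patMin, sets) i = ((pvStepB (patMin, sets) i).1, pvStepAFn sets i) := by
      rw [← hstep.1]
    rw [hpair]
    apply ih
    · exact hstep.2
    · intro k hk hkmem
      have hperm := pvStepAFn_flatten i sets
      have hmem := (hperm.mem_iff).1 hkmem
      simp only [List.mem_cons] at hmem
      cases hmem with
      | inl h => exact (List.nodup_cons.1 hnd).1 (h ▸ hk)
      | inr h => exact hfresh k (by simp [hk]) h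
    · exact (List.nodup_cons.1 hnd).2

lemma pvSetsA_nonempty (keys : List String) : ∀ hs ∈ pvSetsA keys, hs ≠ [] := by
  have main : ∀ (ks : List String) (sets : List (List String)),
      (∀ hs ∈ sets, hs ≠ []) → ∀ hs ∈ ks.foldl pvStepAFn sets, hs ≠ [] := by
    intro ks
    induction ks with
    | nil => intro sets h; simpa using h
    | cons i rest ih =>
      intro sets h
      simp only [List.foldl_cons]
      apply ih
      intro hs hhs
      unfold pvStepAFn at hhs
      rw [pvPlaceA_eq] at hhs
      cases hf : List.findIdx? (fun hs => hs.any fun cl => hamming_distance i cl == some 1) sets with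
      | none =>
        rw [hf] at hhs
        simp only at hhs
        rcases List.mem_append.1 hhs with hh | hh
        · exact h hs hh
        · simp at hh; subst hh; simp
      | some j =>
        rw [hf] at hhs
        simp only at hhs
        rcases List.mem_or_eq_of_mem_set hhs with hh | hh
        · exact h hs hh
        · subst hh; simp
  exact main keys [] (by simp)

-- the second phase of both ports, compared set by set
lemma pvPhase2 (d : PySem.Dict String (List String)) :
    ∀ (hsl : List (List String)), (∀ hs ∈ hsl, hs ≠ []) →
    ∀ (out : PySem.Dict String (List String)),
    hsl.foldl (fun out hset =>
      let lens : List Int := hset.map (fun i => ((d.getD i []).length : Int))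
      match PySem.List.max? lens (fun x => x) with
      | none => out
      | some m =>
        match PySem.List.index? lens m with
        | none => out
        | some idx =>
          match hset[idx]? with
          | none => out
          | some pref =>
            hset.foldl (fun o cl => o.insert pref (o.getD pref [] ++ d.getD cl []))
              (out.insert pref [])) out =
    hsl.foldl (fun out hset =>
      match PySem.List.max? hset (fun cl => ((d.getD cl []).length : Int)) with
      | none => out
      | some pref => out.insert pref (hset.flatMap (fun cl => d.getD cl []))) out := by
  intro hsl
  induction hsl with
  | nil => intro _ out; rfl
  | cons hset rest ih =>
    intro hne out
    simp only [List.foldl_cons]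
    have hne0 : hset ≠ [] := hne hset (by simp)
    set f : String → Int := fun cl => ((d.getD cl []).length : Int) with hf
    cases hmax : PySem.List.max? hset f with
    | none => exact absurd ((PySem.List.max?_eq_none_iff _ _).1 hmax) hne0
    | some pref =>
      obtain ⟨m, idx, h1, h2, h3⟩ := pvArgmax hset f pref hmax
      rw [h1]; dsimp only
      rw [h2]; dsimp only
      rw [h3]; dsimp only
      rw [pvFoldIns, List.nil_append]
      exact ih (fun hs hhs => hne hs (by simp [hhs])) _

-- A's dict argument: iterating the assoc list's first components and looking keys up in it
theorem merge_hamming_clonotype_spec : Claim_equal_merge_hamming_clonotype := by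
  intro clonotype_dict _ hpre
  unfold Spec_merge_hamming_clonotype
  unfold merge_hamming_clonotype merge_hamming_clonotype_alt
  simp only
  have hkeys : ((clonotype_dict.map (·.1)).foldl pvStepB (PySem.Dict.empty, [])).2
      = pvSetsA (clonotype_dict.map (·.1)) := by
    apply pvSets_eq
    · intro p; rfl
    · intro k _ hk; simp at hk
    · exact hpre
  rw [hkeys]
  rw [pvPhase2 (PySem.Dict.mk clonotype_dict) _ (pvSetsA_nonempty _)]
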